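-- pv_equiv track=rewrite | github.com/zabooma/chord-progression | python/src/midi-progression_v0.1.7+.py | optimize_chord
-- ===== SOURCE A (Python) =====
-- def optimize_chord(notes, root_note, max_notes_per_hand=3, max_hand_span=13):
--     notes.sort()
--
--     while max(notes) - min(notes) > max_hand_span:
--         notes.pop()
--
--     priority_intervals = [0, 3, 4, 10]
--     while len(notes) > max_notes_per_hand:
--         for i, note in enumerate(notes):
--             if (note - root_note) % 12 not in priority_intervals:
--                 notes.pop(i)
--                 break
--         else:
--             notes.pop()
--
--     return notes
-- ===== SOURCE B (Python) =====
-- def optimize_chord(notes, root_note, max_notes_per_hand=3, max_hand_span=13):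
--     # Returns a new list (does not mutate `notes`, unlike A).
--     xs = sorted(notes)
--     lo = xs[0]
--     xs = [x for x in xs if x - lo <= max_hand_span]
--     remove = len(xs) - max_notes_per_hand
--     kept = []
--     for x in xs:
--         if remove > 0 and (x - root_note) % 12 not in (0, 3, 4, 10):
--             remove -= 1
--         else:
--             kept.append(x)
--     return kept[:len(kept) - remove] if remove > 0 else kept
-- ===== Notes on version B (the rewrite author's own statement) =====
-- stated objective: faster
-- what changed: A repeatedly recomputes max/min while popping and rescans the whole list from the front for every single note it removes (quadratic); B sorts once, keeps the span prefix with one filter, and removes the excess notes in a single left-to-right pass that carries a removal budget, cutting any remainder off the tail with one slice.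
import Mathlib
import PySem

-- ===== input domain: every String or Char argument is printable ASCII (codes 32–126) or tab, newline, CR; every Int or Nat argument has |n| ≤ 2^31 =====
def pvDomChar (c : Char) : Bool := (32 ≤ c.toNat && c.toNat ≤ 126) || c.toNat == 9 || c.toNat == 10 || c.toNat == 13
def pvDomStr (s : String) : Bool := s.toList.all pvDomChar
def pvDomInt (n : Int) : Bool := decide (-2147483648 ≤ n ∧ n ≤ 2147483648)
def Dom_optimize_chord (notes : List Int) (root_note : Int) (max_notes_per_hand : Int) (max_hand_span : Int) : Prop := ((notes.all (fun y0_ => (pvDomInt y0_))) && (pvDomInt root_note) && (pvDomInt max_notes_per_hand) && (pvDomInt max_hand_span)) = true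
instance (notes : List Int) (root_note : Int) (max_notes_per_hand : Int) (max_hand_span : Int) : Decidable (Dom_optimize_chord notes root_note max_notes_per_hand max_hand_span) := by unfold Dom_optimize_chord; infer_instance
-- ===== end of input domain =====

-- B replaces A's quadratic repeated rescans (pop-until-span, then rescan-and-pop per removed note) by one
-- sort + one filter + one left-to-right counting pass; equivalence is about the RETURN value only (A sorts
-- and pops `notes` in place, B leaves its argument untouched).

-- ===== PORT A =====
-- (note - root_note) % 12 in [0, 3, 4, 10]
def pvPri (root x : Int) : Bool := List.elem (PySem.Int.mod (x - root) 12) [0, 3, 4, 10]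

-- while max(notes) - min(notes) > max_hand_span: notes.pop()
def pvTrimA (xs : List Int) (mhs : Int) : List Int :=
  match xs with
  | [] => []  -- Python: max([]) raises ValueError (outside Pre_)
  | x :: t =>
    match PySem.List.max? (x :: t) (fun y => y), PySem.List.min? (x :: t) (fun y => y) with
    | some mx, some mn =>
      if mx - mn > mhs then pvTrimA (x :: t).dropLast mhs else (x :: t)
    | _, _ => (x :: t)
  termination_by xs.length
  decreasing_by simp [List.length_dropLast]

-- while len(notes) > max_notes_per_hand: pop first non-priority note, else pop last
def pvReduceA (xs : List Int) (root mnph : Int) : List Int :=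
  if (xs.length : Int) > mnph then
    match h : List.findIdx? (fun x => !pvPri root x) xs with
    | some i => pvReduceA (xs.eraseIdx i) root mnph
    | none =>
      match xs with
      | [] => []  -- Python: pop from empty list raises IndexError (outside Pre_)
      | y :: t => pvReduceA (y :: t).dropLast root mnph
  else xs
  termination_by xs.length
  decreasing_by
  · have hi := (List.findIdx?_eq_some_iff_getElem.mp h).1
    simp [List.length_eraseIdx, hi]
    omega
  · simp [List.length_dropLast]

def optimize_chord (notes : List Int) (root_note : Int) (max_notes_per_hand : Int) (max_hand_span : Int) : List Int :=
  pvReduceA (pvTrimA (PySem.List.sorted notes (fun y => y)) max_hand_span) root_note max_notes_per_hand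

-- ===== PORT B =====
-- one step of B's counting pass: drop the note (and decrement the budget) iff budget > 0 and non-priority
def pvStepB (root : Int) (st : Int × List Int) (x : Int) : Int × List Int :=
  if st.1 > 0 ∧ pvPri root x = false then (st.1 - 1, st.2) else (st.1, st.2 ++ [x])

def optimize_chord_alt (notes : List Int) (root_note : Int) (max_notes_per_hand : Int) (max_hand_span : Int) : List Int :=
  let xs0 := PySem.List.sorted notes (fun y => y)
  match PySem.List.pyGet? xs0 0 with
  | none => []  -- Python: xs[0] on empty raises IndexError (outside Pre_)
  | some lo =>
    let xs := xs0.filter (fun x => decide (x - lo ≤ max_hand_span))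
    let st := xs.foldl (pvStepB root_note) ((xs.length : Int) - max_notes_per_hand, [])
    if st.1 > 0 then PySem.List.slice st.2 none (some ((st.2.length : Int) - st.1)) else st.2

-- ===== PRECONDITION & SPEC =====
-- Pre_ excludes exactly the inputs on which A raises: the empty list (max([]) → ValueError), a negative
-- max_hand_span (the trim loop empties the list, then max([]) → ValueError) and a negative
-- max_notes_per_hand (the reduce loop empties the list, then pop() → IndexError).
def Pre_optimize_chord (notes : List Int) (root_note : Int) (max_notes_per_hand : Int) (max_hand_span : Int) : Prop :=
  notes ≠ [] ∧ 0 ≤ max_notes_per_hand ∧ 0 ≤ max_hand_span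
instance (notes : List Int) (root_note : Int) (max_notes_per_hand : Int) (max_hand_span : Int) : Decidable (Pre_optimize_chord notes root_note max_notes_per_hand max_hand_span) := by unfold Pre_optimize_chord; infer_instance

def pvWitness_optimize_chord : List Int × Int × Int × Int := ([60, 64, 67, 72, 76], 60, 3, 13)

def Spec_optimize_chord (notes : List Int) (root_note : Int) (max_notes_per_hand : Int) (max_hand_span : Int) (out : List Int) : Prop := out = optimize_chord_alt notes root_note max_notes_per_hand max_hand_span
instance (notes : List Int) (root_note : Int) (max_notes_per_hand : Int) (max_hand_span : Int) (out : List Int) : Decidable (Spec_optimize_chord notes root_note max_notes_per_hand max_hand_span out) := by unfold Spec_optimize_chord; infer_instance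

-- ===== CLAIM (what is proved, stated in full; the proofs are below) =====
def Claim_equal_optimize_chord : Prop := ∀ (notes : List Int) (root_note : Int) (max_notes_per_hand : Int) (max_hand_span : Int), Dom_optimize_chord notes root_note max_notes_per_hand max_hand_span → Pre_optimize_chord notes root_note max_notes_per_hand max_hand_span → Spec_optimize_chord notes root_note max_notes_per_hand max_hand_span (optimize_chord notes root_note max_notes_per_hand max_hand_span)

-- ===== LEMMAS AND PROOFS =====

-- proof-only mirror of B's counting pass, as a structural recursion
def pvSpecPass (root r : Int) (xs : List Int) : Int × List Int :=
  match xs with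
  | [] => (r, [])
  | x :: t =>
    if r > 0 ∧ pvPri root x = false then pvSpecPass root (r - 1) t
    else ((pvSpecPass root r t).1, x :: (pvSpecPass root r t).2)

theorem pvFoldl_eq_specPass (root : Int) : ∀ (xs : List Int) (r : Int) (acc : List Int),
    xs.foldl (pvStepB root) (r, acc) = ((pvSpecPass root r xs).1, acc ++ (pvSpecPass root r xs).2) := by
  intro xs
  induction xs with
  | nil => intro r acc; simp [pvSpecPass]
  | cons x t ih =>
    intro r acc
    by_cases hc : r > 0 ∧ pvPri root x = false
    · simp [pvSpecPass, pvStepB, hc, ih]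
    · simp [pvSpecPass, pvStepB, hc, ih]

theorem pvSpecPass_nonpos (root : Int) : ∀ (xs : List Int) (r : Int), r ≤ 0 →
    pvSpecPass root r xs = (r, xs) := by
  intro xs
  induction xs with
  | nil => intro r _; simp [pvSpecPass]
  | cons x t ih =>
    intro r hr
    have hc : ¬ (r > 0 ∧ pvPri root x = false) := by rintro ⟨h1, -⟩; omega
    simp [pvSpecPass, hc, ih r hr]

theorem pvSpecPass_pri_prefix (root : Int) : ∀ (p zs : List Int) (r : Int),
    (∀ y ∈ p, pvPri root y = true) →
    pvSpecPass root r (p ++ zs) = ((pvSpecPass root r zs).1, p ++ (pvSpecPass root r zs).2) := by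
  intro p
  induction p with
  | nil => intro zs r _; simp
  | cons y p ih =>
    intro zs r hall
    have hy : pvPri root y = true := hall y (by simp)
    have hrest : ∀ z ∈ p, pvPri root z = true := fun z hz => hall z (by simp [hz])
    simp [pvSpecPass, hy, ih zs r hrest]

theorem pvSpecPass_all_pri (root : Int) (xs : List Int) (r : Int)
    (h : ∀ y ∈ xs, pvPri root y = true) : pvSpecPass root r xs = (r, xs) := by
  have := pvSpecPass_pri_prefix root xs [] r h
  simpa [pvSpecPass] using this

theorem pvSpecPass_len (root : Int) : ∀ (xs : List Int) (r : Int),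
    (pvSpecPass root r xs).1 + (xs.length : Int) = r + ((pvSpecPass root r xs).2.length : Int) := by
  intro xs
  induction xs with
  | nil => intro r; simp [pvSpecPass]
  | cons x t ih =>
    intro r
    simp only [pvSpecPass]
    by_cases hc : r > 0 ∧ pvPri root x = false
    · rw [if_pos hc]
      have := ih (r - 1)
      simp only [List.length_cons]
      push_cast at this ⊢
      omega
    · rw [if_neg hc]
      have := ih r
      simp only [List.length_cons]
      push_cast at this ⊢
      omega

-- A's reduce loop computes exactly B's counting pass followed by the tail cut
theorem pvReduce_eq_pass (root mnph : Int) (hm : 0 ≤ mnph) : ∀ (xs : List Int),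
    pvReduceA xs root mnph =
      (let st := pvSpecPass root ((xs.length : Int) - mnph) xs;
       if st.1 > 0 then List.take (((st.2.length : Int) - st.1)).toNat st.2 else st.2) := by
  suffices H : ∀ (n : Nat) (xs : List Int), xs.length = n →
      pvReduceA xs root mnph =
        (let st := pvSpecPass root ((xs.length : Int) - mnph) xs;
         if st.1 > 0 then List.take (((st.2.length : Int) - st.1)).toNat st.2 else st.2) by
    intro xs; exact H xs.length xs rfl
  intro n
  induction n using Nat.strong_induction_on with
  | _ n ih =>
    intro xs hlen
    rw [pvReduceA]
    by_cases hgt : (xs.length : Int) > mnph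
    · rw [if_pos hgt]
      have hr : (xs.length : Int) - mnph > 0 := by omega
      have hn0 : 0 < n := by omega
      split
      next i hfind =>
        obtain ⟨hi, hxi, hj⟩ := List.findIdx?_eq_some_iff_getElem.mp hfind
        have hxi' : pvPri root xs[i] = false := by simpa using hxi
        have hjp : ∀ y ∈ xs.take i, pvPri root y = true := by
          intro y hy
          obtain ⟨j, hjlt, rfl⟩ := List.getElem_of_mem hy
          have hjlt' : j < i := by
            simp [List.length_take] at hjlt
            omega
          have := hj j hjlt'
          rw [List.getElem_take]
          simpa using this
        have hsplit : xs = xs.take i ++ xs[i] :: xs.drop (i + 1) := by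
          conv_lhs => rw [← List.take_append_drop i xs]
          congr 1
          rw [List.getElem_cons_drop]
        have herase : xs.eraseIdx i = xs.take i ++ xs.drop (i + 1) :=
          List.eraseIdx_eq_take_drop_succ xs i
        have hpass : ∀ r : Int, 0 < r →
            pvSpecPass root r xs = pvSpecPass root (r - 1) (xs.eraseIdx i) := by
          intro r hrpos
          conv_lhs => rw [hsplit]
          rw [pvSpecPass_pri_prefix root _ _ _ hjp]
          have hstep : pvSpecPass root r (xs[i] :: xs.drop (i + 1)) =
              pvSpecPass root (r - 1) (xs.drop (i + 1)) := by
            simp only [pvSpecPass]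
            rw [if_pos ⟨hrpos, hxi'⟩]
          rw [hstep, herase, pvSpecPass_pri_prefix root _ _ _ hjp]
        have hlene : (xs.eraseIdx i).length = n - 1 := by
          rw [List.length_eraseIdx]
          simp only [hi, if_pos]
          omega
        rw [ih (n - 1) (by omega) _ hlene]
        have hLe : ((xs.eraseIdx i).length : Int) = (xs.length : Int) - 1 := by
          rw [List.length_eraseIdx]
          simp only [hi, if_pos]
          omega
        rw [hLe, show (xs.length : Int) - 1 - mnph = (xs.length : Int) - mnph - 1 by ring,
          ← hpass _ hr]
      next hfind =>
        have hall : ∀ y ∈ xs, pvPri root y = true := by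
          intro y hy
          simpa using List.findIdx?_eq_none_iff.mp hfind y hy
        split
        next heq =>
          exfalso
          simp at hr
          omega
        next y t heq =>
          have halld : ∀ z ∈ (y :: t).dropLast, pvPri root z = true := by
            intro z hz
            exact hall z ((List.dropLast_sublist (y :: t)).mem hz)
          have hlend : (y :: t).dropLast.length = n - 1 := by
            simp only [List.length_dropLast]
            omega
          rw [ih (n - 1) (by omega) _ hlend]
          rw [pvSpecPass_all_pri root _ _ halld, pvSpecPass_all_pri root _ _ hall]
          simp only
          by_cases hr1 : ((y :: t).dropLast.length : Int) - mnph > 0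
          · rw [if_pos hr1, if_pos hr]
            rw [show (((y :: t).dropLast.length : Int) -
                (((y :: t).dropLast.length : Int) - mnph)).toNat = mnph.toNat by omega]
            rw [show (((y :: t).length : Int) -
                (((y :: t).length : Int) - mnph)).toNat = mnph.toNat by omega]
            rw [List.dropLast_eq_take, List.take_take]
            congr 1
            simp only [List.length_cons, List.length_dropLast] at hr1 hr hlen ⊢
            push_cast at hr1 hr
            omega
          · rw [if_neg hr1, if_pos hr]
            rw [show (((y :: t).length : Int) -
                (((y :: t).length : Int) - mnph)).toNat = mnph.toNat by omega]
            rw [List.dropLast_eq_take]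
            congr 1
            simp only [List.length_cons, List.length_dropLast] at hr1 hr hlen ⊢
            push_cast at hr1 hr
            omega
    · rw [if_neg hgt, pvSpecPass_nonpos root xs _ (by omega)]
      simp only
      rw [if_neg (by omega)]

theorem pvFoldl_min_head (a : Int) (t : List Int) (h : ∀ b ∈ t, a ≤ b) :
    t.foldl min a = a := by
  induction t with
  | nil => rfl
  | cons b t ih =>
    have hab : min a b = a := min_eq_left (h b (by simp))
    simp only [List.foldl_cons, hab]
    exact ih (fun c hc => h c (by simp [hc]))

theorem pvFoldl_max_le (z : Int) : ∀ (p : List Int) (a : Int), a ≤ z → (∀ y ∈ p, y ≤ z) →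
    p.foldl max a ≤ z := by
  intro p
  induction p with
  | nil => intro a ha _; simpa using ha
  | cons b p ih =>
    intro a ha hall
    simp only [List.foldl_cons]
    exact ih (max a b) (max_le ha (hall b (by simp))) (fun y hy => hall y (by simp [hy]))

-- A's trim loop computes exactly B's span filter on a sorted list
theorem pvTrim_eq_filter (mhs : Int) (hs : 0 ≤ mhs) : ∀ (a : Int) (t : List Int),
    List.Pairwise (· ≤ ·) (a :: t) →
    pvTrimA (a :: t) mhs = (a :: t).filter (fun x => decide (x - a ≤ mhs)) := by
  intro a t
  induction t using List.reverseRecOn with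
  | nil =>
    intro _
    rw [pvTrimA, PySem.List.max?_id_cons, PySem.List.min?_id_cons]
    simp only [List.foldl_nil]
    rw [if_neg (by omega)]
    simp [List.filter_cons]
    exact hs
  | append_singleton p z ih =>
    intro hp
    have hpc := List.pairwise_cons.mp hp
    have haz : a ≤ z := hpc.1 z (by simp)
    have hyz : ∀ y ∈ a :: p, y ≤ z := by
      intro y hy
      rcases List.mem_cons.mp hy with rfl | hyp
      · exact haz
      · exact (List.pairwise_append.mp hpc.2).2.2 y hyp z (by simp)
    have hmin : (p ++ [z]).foldl min a = a := pvFoldl_min_head a _ hpc.1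
    have hmax : (p ++ [z]).foldl max a = z := by
      rw [List.foldl_append]
      simp only [List.foldl_cons, List.foldl_nil]
      exact max_eq_right (pvFoldl_max_le z p a haz (fun y hy => hyz y (by simp [hy])))
    rw [pvTrimA, PySem.List.max?_id_cons, PySem.List.min?_id_cons]
    simp only [hmin, hmax]
    by_cases hspan : z - a > mhs
    · rw [if_pos hspan]
      have hdl : (a :: (p ++ [z])).dropLast = a :: p := by
        rw [← List.cons_append]
        exact List.dropLast_concat
      rw [hdl]
      have hp' : List.Pairwise (· ≤ ·) (a :: p) := by
        refine List.Pairwise.sublist ?_ hp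
        exact List.Sublist.cons₂ a (List.sublist_append_left p [z])
      rw [ih hp']
      conv_rhs => rw [show a :: (p ++ [z]) = (a :: p) ++ [z] by simp]
      rw [List.filter_append]
      simp
      omega
    · rw [if_neg hspan]
      refine (List.filter_eq_self.mpr ?_).symm
      intro x hx
      have hxz : x ≤ z := by
        rcases List.mem_cons.mp hx with rfl | hxm
        · exact haz
        · rcases List.mem_append.mp hxm with hxp | hxz
          · exact hyz x (by simp [hxp])
          · simp at hxz
            omega
      simp
      omega

-- B's port with the sorted list exposed as a :: t (the match on xs0[0] reduced)
theorem pvAlt_eq (notes : List Int) (root mnph mhs a : Int) (t : List Int)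
    (hat : PySem.List.sorted notes (fun y => y) = a :: t) :
    optimize_chord_alt notes root mnph mhs =
      (let xs := (a :: t).filter (fun x => decide (x - a ≤ mhs));
       let st := xs.foldl (pvStepB root) ((xs.length : Int) - mnph, ([] : List Int));
       if st.1 > 0 then PySem.List.slice st.2 none (some ((st.2.length : Int) - st.1))
       else st.2) := by
  simp only [optimize_chord_alt]
  rw [hat]
  have hget : PySem.List.pyGet? (a :: t) (0 : Int) = some a := by
    rw [show (0 : Int) = ((0 : Nat) : Int) from rfl, PySem.List.pyGet?_natCast]
    rfl
  rw [hget]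

-- ===== VERDICT (by name: the statement is the Claim_ definition above) =====
theorem optimize_chord_spec : Claim_equal_optimize_chord := by
  intro notes root mnph mhs _ hpre
  obtain ⟨hne, hm, hs⟩ := hpre
  unfold Spec_optimize_chord
  have hne0 : PySem.List.sorted notes (fun y => y) ≠ [] := by
    simpa [PySem.List.sorted_eq_nil_iff] using hne
  obtain ⟨a, t, hat⟩ := List.exists_cons_of_ne_nil hne0
  have hpw : List.Pairwise (· ≤ ·) (a :: t) := by
    rw [← hat]; simpa using PySem.List.sorted_pairwise notes (fun y => y)
  rw [pvAlt_eq notes root mnph mhs a t hat]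
  unfold optimize_chord
  rw [hat, pvTrim_eq_filter mhs hs a t hpw, pvReduce_eq_pass root mnph hm]
  simp only
  rw [pvFoldl_eq_specPass]
  simp only [List.nil_append]
  have hlenst := pvSpecPass_len root ((a :: t).filter (fun x => decide (x - a ≤ mhs)))
    ((((a :: t).filter (fun x => decide (x - a ≤ mhs))).length : Int) - mnph)
  by_cases hr : (pvSpecPass root
      ((((a :: t).filter (fun x => decide (x - a ≤ mhs))).length : Int) - mnph)
      ((a :: t).filter (fun x => decide (x - a ≤ mhs)))).1 > 0
  · rw [if_pos hr, if_pos hr, PySem.List.slice_to _ (by omega)]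
  · rw [if_neg hr, if_neg hr]
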